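-- pv_equiv track=rewrite | github.com/harika33333/Python-Exercises | Loops_exercises/loops_15.py | odd_list
-- ===== SOURCE A (Python) =====
-- def odd_list(my_list):
--     c=0
--     res=""
--     for i in my_list:
--         if c%2!=0:
--             res=res+str(i)+" "
--         c=c+1
--     return(res)
-- ===== SOURCE B (Python) =====
-- # B: consumes the list two elements at a time (keeping the second of each pair),
-- # collecting pieces and joining once; no parity counter, no per-element branch.
-- def odd_list(my_list):
--     parts = []
--     it = iter(my_list)
--     for _, y in zip(it, it):
--         parts.append(str(y) + " ")
--     return "".join(parts)
-- ===== Notes on version B (the rewrite author's own statement) =====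
-- stated objective: faster
-- what changed: Replaces the parity-counter loop with per-element branch and repeated quadratic string concatenation by consuming the list two elements at a time (keeping the second of each pair), collecting the pieces in a list and joining once.
import Mathlib
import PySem

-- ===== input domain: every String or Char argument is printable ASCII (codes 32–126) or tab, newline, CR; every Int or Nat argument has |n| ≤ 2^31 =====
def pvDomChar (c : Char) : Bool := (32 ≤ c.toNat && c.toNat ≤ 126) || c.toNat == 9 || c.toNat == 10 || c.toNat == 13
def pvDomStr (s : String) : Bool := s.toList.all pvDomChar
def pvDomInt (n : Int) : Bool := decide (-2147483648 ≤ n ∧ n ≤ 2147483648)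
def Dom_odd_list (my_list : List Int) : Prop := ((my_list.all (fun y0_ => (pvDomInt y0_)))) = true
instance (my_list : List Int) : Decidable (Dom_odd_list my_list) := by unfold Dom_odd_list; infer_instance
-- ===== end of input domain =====

-- B peels two elements at a time (keeping the second of each pair) and joins the
-- collected pieces once, instead of A's parity counter with per-element branching.


-- ===== PORT A =====
def odd_list (my_list : List Int) : String :=
  (my_list.foldl
    (fun (st : Int × String) i =>
      (st.1 + 1,
       if PySem.Int.mod st.1 2 != 0 then st.2 ++ PySem.Int.toStr i ++ " " else st.2))
    ((0 : Int), "")).2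

-- ===== PORT B =====
-- for _, y in zip(it, it): parts.append(str(y) + " ")  -- consume two, keep the second
def oddPairsGo : List Int → List String → List String
  | _ :: y :: r, parts => oddPairsGo r (parts ++ [PySem.Int.toStr y ++ " "])
  | _, parts => parts

def odd_list_alt (my_list : List Int) : String :=
  PySem.Str.join "" (oddPairsGo my_list [])

-- ===== PRECONDITION & SPEC =====
def Spec_odd_list (my_list : List Int) (out : String) : Prop := out = odd_list_alt my_list
instance (my_list : List Int) (out : String) : Decidable (Spec_odd_list my_list out) := by unfold Spec_odd_list; infer_instance

-- ===== CLAIM (what is proved, stated in full; the proofs are below) =====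
def Claim_equal_odd_list : Prop := ∀ (my_list : List Int), Dom_odd_list my_list → Spec_odd_list my_list (odd_list my_list)

-- ===== LEMMAS AND PROOFS =====

-- empty-separator join splits at a cons
lemma join_empty_cons (s : String) (l : List String) :
    PySem.Str.join "" (s :: l) = s ++ PySem.Str.join "" l := by
  cases l with
  | nil =>
      rw [← String.toList_inj]
      simp [PySem.Str.toList_join, PySem.Chars.join_singleton, PySem.Chars.join_nil,
        String.toList_append]
  | cons t l =>
      rw [← String.toList_inj]
      simp [PySem.Str.toList_join, PySem.Chars.join_cons_cons, String.toList_append]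

-- the accumulator of oddPairsGo is a prefix of the result
lemma oddPairsGo_acc : ∀ (xs : List Int) (parts : List String),
    oddPairsGo xs parts = parts ++ oddPairsGo xs []
  | [], parts => by simp [oddPairsGo]
  | [x], parts => by simp [oddPairsGo]
  | x :: y :: r, parts => by
      rw [oddPairsGo, oddPairsGo, oddPairsGo_acc r (parts ++ _),
        oddPairsGo_acc r ([] ++ _)]
      simp

-- A's fold from an even counter produces B's joined pieces
lemma foldl_even : ∀ (xs : List Int) (c : Int) (res : String), PySem.Int.mod c 2 = 0 →
    (xs.foldl
      (fun (st : Int × String) i =>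
        (st.1 + 1,
         if PySem.Int.mod st.1 2 != 0 then st.2 ++ PySem.Int.toStr i ++ " " else st.2))
      (c, res)).2 = res ++ PySem.Str.join "" (oddPairsGo xs [])
  | [], c, res, h => by
      rw [← String.toList_inj]
      simp [oddPairsGo, PySem.Str.toList_join, PySem.Chars.join_nil, String.toList_append]
  | [x], c, res, h => by
      rw [← String.toList_inj]
      simp only [List.foldl, h, bne_self_eq_false, if_neg Bool.false_ne_true]
      simp [oddPairsGo, PySem.Str.toList_join, PySem.Chars.join_nil, String.toList_append]
  | x :: y :: r, c, res, h => by
      have h1 : PySem.Int.mod (c + 1) 2 ≠ 0 := by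
        simp only [PySem.Int.mod, Int.fmod_eq_emod] at h ⊢
        norm_num at h ⊢; omega
      have h2 : PySem.Int.mod (c + 1 + 1) 2 = 0 := by
        simp only [PySem.Int.mod, Int.fmod_eq_emod] at h ⊢
        norm_num at h ⊢; omega
      simp only [List.foldl, h, bne_self_eq_false, if_neg Bool.false_ne_true,
        if_pos (bne_iff_ne.mpr h1)]
      rw [foldl_even r (c + 1 + 1) _ h2]
      have hgo : oddPairsGo (x :: y :: r) [] =
          (PySem.Int.toStr y ++ " ") :: oddPairsGo r [] := by
        rw [oddPairsGo, oddPairsGo_acc]; simp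
      rw [hgo, join_empty_cons]
      simp [String.append_assoc]

-- ===== VERDICT (by name: the statement is the Claim_ definition above) =====
theorem odd_list_spec : Claim_equal_odd_list := by
  intro my_list _
  show odd_list my_list = odd_list_alt my_list
  rw [odd_list, odd_list_alt, foldl_even my_list 0 "" (by simp [PySem.Int.mod])]
  rw [← String.toList_inj]
  simp
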